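-- pv_equiv track=rewrite | github.com/AltoPelago/aeon | implementations/python/src/aeon/lexer.py | valid_numeric_underscores
-- ===== SOURCE A (Python) =====
-- def valid_numeric_underscores(value: str) -> bool:
--     for index, char in enumerate(value):
--         if char != "_":
--             continue
--         if index == 0 or index == len(value) - 1:
--             return False
--         if not value[index - 1].isdigit() or not value[index + 1].isdigit():
--             return False
--     return "__" not in value
-- ===== SOURCE B (Python) =====
-- def valid_numeric_underscores(value: str) -> bool:
--     parts = value.split('_')
--     if len(parts) == 1:
--         return True
--     if any(p == '' for p in parts):
--         return False
--     return all(p[-1].isdigit() and q[0].isdigit() for p, q in zip(parts, parts[1:]))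
-- ===== Notes on version B (the rewrite author's own statement) =====
-- stated objective: faster
-- what changed: B splits the literal on '_' once and checks that every segment is non-empty and that each underscore is flanked by digit segment boundaries, instead of A's per-character indexed scan with value[i-1]/value[i+1] arithmetic plus a final '__' substring test.
import Mathlib
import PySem

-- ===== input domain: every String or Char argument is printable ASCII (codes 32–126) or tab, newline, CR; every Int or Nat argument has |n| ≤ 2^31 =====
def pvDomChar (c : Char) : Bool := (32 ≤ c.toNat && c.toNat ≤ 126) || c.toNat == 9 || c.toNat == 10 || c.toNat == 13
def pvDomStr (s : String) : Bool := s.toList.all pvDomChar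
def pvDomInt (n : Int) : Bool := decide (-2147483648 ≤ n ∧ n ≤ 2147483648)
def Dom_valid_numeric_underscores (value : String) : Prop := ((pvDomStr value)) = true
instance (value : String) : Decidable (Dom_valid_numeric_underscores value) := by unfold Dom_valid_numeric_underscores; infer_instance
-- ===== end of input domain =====

-- B validates underscore placement by splitting on '_' and checking segment boundaries,
-- instead of A's per-character indexed scan; measured faster by a constant factor (C-level split).


-- ===== PORT A =====
-- value[i-1] / value[i+1]: A's guards keep the index in range, so the `.getD ' '`
-- default is never used (Python raises only out of range, which cannot happen here)
def pvGetC (cs : List Char) (i : Int) : Char := (PySem.List.pyGet? cs i).getD ' '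

-- the `for index, char in enumerate(value)` loop with its early returns;
-- falling off the end yields `"__" not in value`
def aLoop (cs : List Char) : List (Int × Char) → Bool
  | [] => !(PySem.Chars.isIn ['_', '_'] cs)
  | (i, ch) :: rest =>
    if ch ≠ '_' then aLoop cs rest
    else if i == 0 || i == (cs.length : Int) - 1 then false
    else if !(PySem.Chars.isdigit (pvGetC cs (i - 1))) ||
            !(PySem.Chars.isdigit (pvGetC cs (i + 1))) then false
    else aLoop cs rest

def valid_numeric_underscores (value : String) : Bool :=
  aLoop value.toList (PySem.List.enumerate value.toList 0)

-- ===== PORT B =====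
-- p[-1].isdigit() / q[0].isdigit() on the neighbouring parts
def lastDig (p : List Char) : Bool :=
  match p.getLast? with
  | some c => PySem.Chars.isdigit c
  | none => false

def headDig (q : List Char) : Bool :=
  match q.head? with
  | some c => PySem.Chars.isdigit c
  | none => false

def valid_numeric_underscores_alt (value : String) : Bool :=
  let parts := PySem.Chars.splitOn value.toList ['_']
  if parts.length == 1 then true
  else if parts.any (fun p => p == []) then false
  else (parts.zip parts.tail).all (fun pq => lastDig pq.1 && headDig pq.2)

-- ===== PRECONDITION & SPEC =====
def Spec_valid_numeric_underscores (value : String) (out : Bool) : Prop := out = valid_numeric_underscores_alt value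
instance (value : String) (out : Bool) : Decidable (Spec_valid_numeric_underscores value out) := by unfold Spec_valid_numeric_underscores; infer_instance

-- ===== CLAIM (what is proved, stated in full; the proofs are below) =====
def Claim_equal_valid_numeric_underscores : Prop := ∀ (value : String), Dom_valid_numeric_underscores value → Spec_valid_numeric_underscores value (valid_numeric_underscores value)

-- ===== LEMMAS AND PROOFS =====

-- common ground: a one-pass check carrying "was the previous char a digit?"
def okAux (b : Bool) : List Char → Bool
  | [] => true
  | c :: rest =>
    if c = '_' then b && headDig rest && okAux false rest
    else okAux (PySem.Chars.isdigit c) rest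

-- "last char of the prefix is a digit"
def prevB (pre : List Char) : Bool :=
  match pre.getLast? with
  | some c => PySem.Chars.isdigit c
  | none => false

-- a double underscore forces okAux to fail
lemma okAux_double (b : Bool) (s t : List Char) :
    okAux b (s ++ ['_', '_'] ++ t) = false := by
  induction s generalizing b with
  | nil => simp [okAux, headDig]
  | cons a s ih =>
    have ih' : ∀ b', okAux b' (s ++ '_' :: '_' :: t) = false := by
      intro b'; simpa [List.append_assoc] using ih b'
    by_cases h : a = '_' <;> simp [okAux, h, ih']

lemma okAux_no_double (b : Bool) (cs : List Char) (h : okAux b cs = true) :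
    PySem.Chars.isIn ['_', '_'] cs = false := by
  rcases hin : PySem.Chars.isIn ['_', '_'] cs with _ | _
  · rfl
  · exfalso
    rcases (PySem.Chars.isIn_iff_infix _ _).1 hin with ⟨s, t, rfl⟩
    rw [okAux_double] at h
    exact Bool.false_ne_true h

-- ===== A-side: the indexed loop equals okAux =====

lemma pyGet_append_last (pre : List Char) (c : Char) (rest : List Char) (h : pre ≠ []) :
    pvGetC (pre ++ c :: rest) ((pre.length : Int) - 1) = pre.getLast h := by
  have hl : 0 < pre.length := List.length_pos_iff.2 h
  have he : ((pre.length : Int) - 1) = ((pre.length - 1 : Nat) : Int) := by omega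
  rw [pvGetC, he, PySem.List.pyGet?_natCast]
  have hlt : pre.length - 1 < (pre ++ c :: rest).length := by simp; omega
  rw [List.getElem?_eq_getElem hlt, Option.getD_some,
      List.getElem_append_left (by omega), List.getLast_eq_getElem]

lemma pyGet_append_next (pre : List Char) (c q : Char) (rest : List Char) :
    pvGetC (pre ++ c :: q :: rest) ((pre.length : Int) + 1) = q := by
  have he : ((pre.length : Int) + 1) = ((pre.length + 1 : Nat) : Int) := by omega
  rw [pvGetC, he, PySem.List.pyGet?_natCast]
  have hlt : pre.length + 1 < (pre ++ c :: q :: rest).length := by simp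
  rw [List.getElem?_eq_getElem hlt, Option.getD_some,
      List.getElem_append_right (by omega)]
  simp

lemma prevB_append (pre : List Char) (c : Char) :
    prevB (pre ++ [c]) = PySem.Chars.isdigit c := by
  simp [prevB]

lemma aLoop_eq (suf pre : List Char) :
    aLoop (pre ++ suf) (PySem.List.enumerate suf (pre.length : Int)) =
      (if okAux (prevB pre) suf then !(PySem.Chars.isIn ['_', '_'] (pre ++ suf)) else false) := by
  induction suf generalizing pre with
  | nil => simp [aLoop, PySem.List.enumerate, okAux]
  | cons c rest ih =>
    rw [PySem.List.enumerate_cons]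
    by_cases hc : c = '_'
    · subst hc
      by_cases hpre : pre = []
      · subst hpre
        simp [aLoop, okAux, prevB]
      · have hlen : pre.length ≠ 0 := fun h => hpre (List.length_eq_zero_iff.1 h)
        rcases rest with _ | ⟨q, rest'⟩
        · -- last character: i == len(value) - 1
          have hg : ((pre.length : Int) == ((pre ++ ['_']).length : Int) - 1) = true := by
            simp
          simp only [aLoop, ne_eq, not_true_eq_false, if_false, hg, Bool.or_true, if_true]
          simp [okAux, headDig]
        · have hg : (((pre.length : Int) == 0)
              || ((pre.length : Int) == ((pre ++ '_' :: q :: rest').length : Int) - 1)) = false := by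
            simp
            constructor <;> omega
          simp only [aLoop, ne_eq, not_true_eq_false, if_false]
          rw [hg]
          simp only [Bool.false_eq_true, if_false]
          rw [pyGet_append_last pre '_' (q :: rest') hpre, pyGet_append_next]
          have hsome := List.getLast?_eq_some_getLast (l := pre) hpre
          have hlast : PySem.Chars.isdigit (pre.getLast hpre) = prevB pre := by
            simp [prevB, hsome]
          rw [hlast]
          by_cases h1 : prevB pre = true
          · by_cases h2 : PySem.Chars.isdigit q = true
            · simp only [h1, h2, Bool.not_true, Bool.or_self, Bool.false_eq_true, if_false]
              have hih := ih (pre ++ ['_'])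
              rw [List.append_assoc] at hih
              simp only [List.cons_append, List.nil_append, List.length_append,
                List.length_cons, List.length_nil] at hih
              push_cast at hih
              have hu : PySem.Chars.isdigit '_' = false := by decide
              rw [hih, prevB_append, hu]
              rw [show okAux true ('_' :: q :: rest')
                    = (true && headDig (q :: rest') && okAux false (q :: rest')) from rfl]
              have hh : headDig (q :: rest') = true := by simp [headDig, h2]
              rw [hh]
              cases okAux false (q :: rest') <;> simp
            · simp only [Bool.not_eq_true] at h2
              simp [h1, h2, okAux, headDig]
          · simp only [Bool.not_eq_true] at h1
            simp [h1, okAux]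
    · -- char ≠ '_': continue
      simp only [aLoop, ne_eq, hc, not_false_eq_true, if_true]
      have hih := ih (pre ++ [c])
      rw [List.append_assoc] at hih
      simp only [List.cons_append, List.nil_append, List.length_append,
        List.length_cons, List.length_nil] at hih
      push_cast at hih
      rw [hih, prevB_append]
      simp [okAux, hc]

lemma portA_eq_okAux (cs : List Char) :
    aLoop cs (PySem.List.enumerate cs 0) = okAux false cs := by
  have h := aLoop_eq cs []
  simp only [List.nil_append, List.length_nil, Nat.cast_zero] at h
  rw [h]
  rcases hk : okAux false cs with _ | _
  · simp [prevB, hk]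
  · simp [prevB, hk, okAux_no_double false cs (by simpa [prevB] using hk)]

-- ===== B-side: splitOn equals a structural split, and B's checks equal okAux =====

def msplit : List Char → List (List Char)
  | [] => [[]]
  | c :: rest => if c = '_' then [] :: msplit rest else (msplit rest).modifyHead (c :: ·)

lemma msplit_ne_nil (l : List Char) : msplit l ≠ [] := by
  cases l with
  | nil => simp [msplit]
  | cons c rest =>
    simp only [msplit]
    split
    · simp
    · have h := msplit_ne_nil rest
      intro hn
      rw [← List.length_eq_zero_iff, List.length_modifyHead, List.length_eq_zero_iff] at hn
      exact h hn

lemma modifyHead_fun_id (l : List (List Char)) : List.modifyHead (fun x => x) l = l := by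
  cases l <;> simp

lemma go_eq_msplit : ∀ (l : List Char) (fuel : Nat) (cur : List Char) (acc : List (List Char)),
    l.length < fuel →
    PySem.Chars.splitOn.go ['_'] fuel l cur acc
      = acc.reverse ++ (msplit l).modifyHead (fun x => cur.reverse ++ x) := by
  intro l
  induction l with
  | nil =>
    intro fuel cur acc h
    match fuel, h with
    | fuel + 1, _ => simp [PySem.Chars.splitOn.go, msplit]
  | cons c rest ih =>
    intro fuel cur acc h
    match fuel, h with
    | fuel + 1, h =>
      by_cases hc : c = '_'
      · subst hc
        have hpre : List.isPrefixOf ['_'] ('_' :: rest) = true := by simp [List.isPrefixOf]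
        rw [PySem.Chars.splitOn.go]
        simp only [hpre, if_true, List.drop_succ_cons, List.drop_zero, List.length_singleton]
        rw [ih fuel [] (cur.reverse :: acc) (by simp at h; omega)]
        simp [msplit, modifyHead_fun_id]
      · have hpre : List.isPrefixOf ['_'] (c :: rest) = false := by
          simp [List.isPrefixOf]; exact fun h => hc h.symm
        rw [PySem.Chars.splitOn.go]
        simp only [hpre, Bool.false_eq_true, if_false]
        rw [ih fuel (c :: cur) acc (by simp at h; omega)]
        simp only [msplit, hc, if_false]
        rcases hm : msplit rest with _ | ⟨p, ps⟩
        · exact absurd hm (msplit_ne_nil rest)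
        · simp

lemma splitOn_eq_msplit (l : List Char) : PySem.Chars.splitOn l ['_'] = msplit l := by
  rw [PySem.Chars.splitOn, go_eq_msplit l (l.length + 1) [] [] (by omega)]
  simp [modifyHead_fun_id]

-- last-char-is-digit, defaulting to b when the part is empty (prev char was '_' or absent)
def lastDigB (b : Bool) (p : List Char) : Bool :=
  match p.getLast? with
  | some c => PySem.Chars.isdigit c
  | none => b

-- B's boundary conditions, expressed recursively over the parts
def chk (b : Bool) : List (List Char) → Bool
  | [] => true
  | [_] => true
  | p :: q :: ps => lastDigB b p && headDig q && chk false (q :: ps)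

lemma headDig_msplit (rest : List Char) (q : List Char) (ps : List (List Char))
    (h : msplit rest = q :: ps) : headDig q = headDig rest := by
  cases rest with
  | nil => simp [msplit] at h; simp [h.1]
  | cons c r =>
    by_cases hc : c = '_'
    · subst hc
      simp [msplit] at h
      rw [h.1]
      simp [headDig]
      decide
    · simp only [msplit, hc, if_false] at h
      rcases hm : msplit r with _ | ⟨p', ps'⟩
      · exact absurd hm (msplit_ne_nil r)
      · rw [hm] at h
        simp at h
        rw [← h.1]
        simp [headDig]

lemma lastDigB_cons (b : Bool) (c : Char) (p : List Char) :
    lastDigB b (c :: p) = lastDigB (PySem.Chars.isdigit c) p := by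
  cases p with
  | nil => simp [lastDigB]
  | cons x xs =>
    rcases hl : (x :: xs).getLast? with _ | y
    · simp at hl
    · simp [lastDigB, List.getLast?_cons_cons, hl]

lemma chk_cons_head (b : Bool) (c : Char) (p : List Char) (ps : List (List Char)) :
    chk b ((c :: p) :: ps) = chk (PySem.Chars.isdigit c) (p :: ps) := by
  cases ps with
  | nil => simp [chk]
  | cons q ps' => simp [chk, lastDigB_cons]

lemma okAux_eq_chk (cs : List Char) : ∀ b, okAux b cs = chk b (msplit cs) := by
  induction cs with
  | nil => intro b; simp [okAux, msplit, chk]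
  | cons c rest ih =>
    intro b
    by_cases hc : c = '_'
    · subst hc
      rcases hm : msplit rest with _ | ⟨q, ps⟩
      · exact absurd hm (msplit_ne_nil rest)
      · simp only [okAux, if_true, msplit, hm, chk]
        rw [ih false, hm, headDig_msplit rest q ps hm]
        simp [lastDigB]
    · rcases hm : msplit rest with _ | ⟨p, ps⟩
      · exact absurd hm (msplit_ne_nil rest)
      · simp only [okAux, hc, if_false, msplit, hm, List.modifyHead_cons]
        rw [ih (PySem.Chars.isdigit c), hm, chk_cons_head]

lemma chk_eq_all : ∀ (ps : List (List Char)) (p q : List Char),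
    chk false (p :: q :: ps) =
      (!(p :: q :: ps).any (fun x => x == [])
        && ((p :: q :: ps).zip (q :: ps)).all (fun pq => lastDig pq.1 && headDig pq.2)) := by
  intro ps
  induction ps with
  | nil =>
    intro p q
    simp only [chk]
    cases p <;> cases q <;>
      simp [lastDig, lastDigB, headDig, Bool.and_comm]
  | cons r ps ih =>
    intro p q
    rw [show chk false (p :: q :: r :: ps)
          = (lastDigB false p && headDig q && chk false (q :: r :: ps)) from rfl]
    rw [ih q r]
    have hl : lastDigB false p = lastDig p := rfl
    rw [hl]
    cases hp : lastDig p with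
    | false => simp [hp]
    | true =>
      have hpe : p.isEmpty = false := by cases p <;> simp_all [lastDig]
      simp [hpe, List.any_cons, List.zip_cons_cons, List.all_cons, hp,
        Bool.and_assoc, Bool.and_comm, Bool.and_left_comm]

lemma portB_eq_chk (value : String) :
    valid_numeric_underscores_alt value = chk false (msplit value.toList) := by
  rw [valid_numeric_underscores_alt]
  simp only [splitOn_eq_msplit]
  rcases hm : msplit value.toList with _ | ⟨p, ps⟩
  · exact absurd hm (msplit_ne_nil _)
  · rcases ps with _ | ⟨q, ps'⟩
    · simp [chk]
    · rw [chk_eq_all]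
      simp only [List.length_cons, List.tail_cons]
      have hlen : ((ps'.length + 1 + 1 : Nat) == 1) = false := by simp
      rw [if_neg (by simp)]
      cases (p :: q :: ps').any (fun x => x == []) <;> simp

-- ===== VERDICT (by name: the statement is the Claim_ definition above) =====
theorem valid_numeric_underscores_spec : Claim_equal_valid_numeric_underscores := by
  intro value _
  show valid_numeric_underscores value = valid_numeric_underscores_alt value
  rw [valid_numeric_underscores, portA_eq_okAux, okAux_eq_chk, portB_eq_chk]
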